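-- pv_equiv track=rewrite | github.com/etri-city-traffic-brain/traffic-signal-optimization | atsc-rl/multiagent_tf2/TSOUtil.py | removeWhitespaceBtnComma
-- ===== SOURCE A (Python) =====
-- def removeWhitespaceBtnComma(comma_separated_string):
--     '''
--     Removes white spaces between commas from comma-separated strings.
--     :param comma_separated_string:
--     :return:
--     '''
--     tokens = comma_separated_string.split(',')
--     num_tokens = len(tokens)
--
--     if num_tokens >= 1:
--         cvted = tokens[0].strip()
--
--     for i in range(1, num_tokens):
--         cvted = cvted + "," + tokens[i].strip()
--
--     return cvted
-- ===== SOURCE B (Python) =====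
-- def removeWhitespaceBtnComma(comma_separated_string):
--     # One-pass scan: whitespace is held in a pending buffer and flushed only
--     # when it turns out to be interior to a token (not adjacent to a comma or an end).
--     out = []
--     buf = []
--     for c in comma_separated_string:
--         if c.isspace():
--             buf.append(c)
--         elif c == ',':
--             buf = []
--             out.append(',')
--         else:
--             if out and out[-1] != ',':
--                 out.extend(buf)
--             buf = []
--             out.append(c)
--     return ''.join(out)
-- ===== Notes on version B (the rewrite author's own statement) =====
-- stated objective: alternative
-- what changed: Replaces split-on-comma + per-token strip + rejoin with a single left-to-right character scan that buffers pending whitespace and flushes it only when it turns out to be interior to a token.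
import Mathlib
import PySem

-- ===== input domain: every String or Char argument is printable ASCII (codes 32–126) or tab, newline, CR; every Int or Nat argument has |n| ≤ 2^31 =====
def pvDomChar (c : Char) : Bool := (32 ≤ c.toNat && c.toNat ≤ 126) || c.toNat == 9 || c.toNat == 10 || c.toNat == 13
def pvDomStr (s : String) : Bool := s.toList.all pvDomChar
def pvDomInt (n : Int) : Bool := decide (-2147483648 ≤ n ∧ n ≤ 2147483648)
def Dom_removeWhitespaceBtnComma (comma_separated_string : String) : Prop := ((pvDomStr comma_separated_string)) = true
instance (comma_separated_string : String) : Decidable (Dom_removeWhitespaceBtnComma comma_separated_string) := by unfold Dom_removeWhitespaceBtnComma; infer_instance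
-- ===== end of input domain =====

-- B replaces A's split/strip/rejoin with a single left-to-right scan holding pending
-- whitespace in a buffer that is flushed only when interior to a token (objective: alternative).

-- ===== PORT A =====
-- tokens = s.split(','); cvted = tokens[0].strip(); for i in range(1, n): cvted += "," + tokens[i].strip()
def removeWhitespaceBtnComma (comma_separated_string : String) : String :=
  let tokens := PySem.Chars.splitOn comma_separated_string.toList [',']
  match tokens with
  | [] => ""  -- unreachable: str.split never returns an empty list
  | t :: rest =>
    String.ofList (rest.foldl (fun cvted tok => cvted ++ [','] ++ PySem.Chars.strip tok)
      (PySem.Chars.strip t))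

-- ===== PORT B =====
-- the scan loop of Source B: out = emitted chars, buf = pending whitespace
def pvAltGo : List Char → List Char → List Char → List Char
  | [], out, _buf => out
  | c :: cs, out, buf =>
    if PySem.Chars.isspace c then pvAltGo cs out (buf ++ [c])
    else if c = ',' then pvAltGo cs (out ++ [',']) []
    else pvAltGo cs ((if out ≠ [] ∧ out.getLast? ≠ some ',' then out ++ buf else out) ++ [c]) []

def removeWhitespaceBtnComma_alt (comma_separated_string : String) : String :=
  String.ofList (pvAltGo comma_separated_string.toList [] [])

-- ===== PRECONDITION & SPEC =====
def Spec_removeWhitespaceBtnComma (comma_separated_string : String) (out : String) : Prop := out = removeWhitespaceBtnComma_alt comma_separated_string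
instance (comma_separated_string : String) (out : String) : Decidable (Spec_removeWhitespaceBtnComma comma_separated_string out) := by unfold Spec_removeWhitespaceBtnComma; infer_instance

-- ===== CLAIM (what is proved, stated in full; the proofs are below) =====
def Claim_equal_removeWhitespaceBtnComma : Prop := ∀ (comma_separated_string : String), Dom_removeWhitespaceBtnComma comma_separated_string → Spec_removeWhitespaceBtnComma comma_separated_string (removeWhitespaceBtnComma comma_separated_string)

-- ===== LEMMAS AND PROOFS =====

-- PySem.Chars.splitOn with the one-char separator "," is Mathlib's List.splitOn ','
theorem pvSplitOn_go_spec (fuel : Nat) : ∀ (l cur : List Char) (acc : List (List Char)), l.length < fuel →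
    PySem.Chars.splitOn.go [','] fuel l cur acc
      = acc.reverse ++ (List.splitOn ',' l).modifyHead (cur.reverse ++ ·) := by
  induction fuel with
  | zero => intro l cur acc h; omega
  | succ fuel ih =>
    intro l cur acc h
    match l with
    | [] =>
      rw [PySem.Chars.splitOn.go.eq_def]
      simp [List.splitOn, List.splitOnP_nil]
    | c :: rest =>
      by_cases hc : c = ','
      · subst hc
        have hp : List.isPrefixOf [','] (',' :: rest) = true := by simp [List.isPrefixOf]
        rw [PySem.Chars.splitOn.go.eq_def]
        simp only [hp, if_pos]
        rw [show List.drop [','].length (',' :: rest) = rest from rfl,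
          ih rest [] (cur.reverse :: acc) (by simpa using Nat.lt_of_succ_lt_succ h)]
        simp [List.splitOn, List.splitOnP_cons]
        rw [show (fun x : List Char => x) = id from rfl, List.modifyHead_id]
        rfl
      · have hp : List.isPrefixOf [','] (c :: rest) = false := by
          simp only [List.isPrefixOf, Bool.and_eq_false_iff, beq_eq_false_iff_ne, ne_eq]
          exact Or.inl fun h => hc h.symm
        rw [PySem.Chars.splitOn.go.eq_def]
        simp only [hp, Bool.false_eq_true, if_false]
        rw [ih rest (c :: cur) acc (by simpa using Nat.lt_of_succ_lt_succ h)]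
        simp only [List.splitOn, List.splitOnP_cons, beq_iff_eq, hc, if_false,
          List.modifyHead_modifyHead]
        congr 2
        funext x
        simp

theorem pvSplitOn_eq (cs : List Char) :
    PySem.Chars.splitOn cs [','] = List.splitOn ',' cs := by
  have e : List.modifyHead (fun x : List Char => x) (List.splitOn ',' cs) = List.splitOn ',' cs := by
    rw [show (fun x : List Char => x) = id from rfl, List.modifyHead_id]
    rfl
  have := pvSplitOn_go_spec (cs.length + 1) cs [] [] (by omega)
  simpa [PySem.Chars.splitOn, e] using this

-- dropWhile passes over a ++ when the marked element fails the predicate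
theorem pvDropWhile_append_cons {p : Char → Bool} {c : Char} (hc : p c = false) :
    ∀ (x y : List Char), List.dropWhile p (x ++ c :: y) = List.dropWhile p x ++ c :: y := by
  intro x y
  induction x with
  | nil => simp [hc]
  | cons a x ih =>
    simp only [List.cons_append, List.dropWhile_cons]
    by_cases ha : p a = true
    · simpa [ha] using ih
    · simp [ha]

theorem pvRstrip_append_cons {c : Char} (hc : PySem.Chars.isspace c = false)
    (b h : List Char) :
    PySem.Chars.rstrip (b ++ c :: h) = b ++ c :: PySem.Chars.rstrip h := by
  simp only [PySem.Chars.rstrip, List.reverse_append, List.reverse_cons, List.append_assoc,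
    List.singleton_append]
  rw [pvDropWhile_append_cons hc]
  simp

theorem pvRstrip_all_space {b : List Char} (hb : b.all PySem.Chars.isspace = true) :
    PySem.Chars.rstrip b = [] := by
  simp only [PySem.Chars.rstrip, List.reverse_eq_nil_iff]
  rw [List.dropWhile_eq_nil_iff]
  intro x hx
  exact (List.all_eq_true.mp hb) x (List.mem_reverse.mp hx)

theorem pvStrip_cons_space {c : Char} (hc : PySem.Chars.isspace c = true) (t : List Char) :
    PySem.Chars.strip (c :: t) = PySem.Chars.strip t := by
  simp [PySem.Chars.strip, PySem.Chars.lstrip, hc]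

theorem pvStrip_cons_nonspace {c : Char} (hc : PySem.Chars.isspace c = false) (t : List Char) :
    PySem.Chars.strip (c :: t) = c :: PySem.Chars.rstrip t := by
  simp only [PySem.Chars.strip, PySem.Chars.lstrip, List.dropWhile_cons, hc,
    Bool.false_eq_true, if_false]
  simpa using pvRstrip_append_cons hc [] t

-- joined tail of stripped tokens
def pvTailJoin (ts : List (List Char)) : List Char :=
  ts.flatMap (fun t => ',' :: PySem.Chars.strip t)

-- the scan with `out` abstracted away: only the flag (out nonempty and not ending in ',') matters
def pvTailRes : Bool → List Char → List Char → List Char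
  | _, _, [] => []
  | flag, buf, c :: cs =>
    if PySem.Chars.isspace c then pvTailRes flag (buf ++ [c]) cs
    else if c = ',' then ',' :: pvTailRes false [] cs
    else (if flag then buf else []) ++ c :: pvTailRes true [] cs

theorem pvAltGo_eq (cs : List Char) : ∀ (out buf : List Char),
    pvAltGo cs out buf
      = out ++ pvTailRes (decide (out ≠ [] ∧ out.getLast? ≠ some ',')) buf cs := by
  induction cs with
  | nil => intro out buf; simp [pvAltGo, pvTailRes]
  | cons c cs ih =>
    intro out buf
    by_cases hs : PySem.Chars.isspace c = true
    · simp only [pvAltGo, pvTailRes, hs, if_pos]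
      exact ih out (buf ++ [c])
    · by_cases hc : c = ','
      · subst hc
        simp only [pvAltGo, pvTailRes, hs, Bool.false_eq_true, if_false]
        rw [ih (out ++ [',']) []]
        simp
      · simp only [pvAltGo, pvTailRes, hs, Bool.false_eq_true, if_false, hc, if_false]
        rw [ih _ []]
        simp only [List.getLast?_concat]
        by_cases hf : out ≠ [] ∧ out.getLast? ≠ some ','
        · simp [hf, hc, List.append_assoc]
        · simp [hf, hc]

theorem pvTailRes_spec (cs : List Char) : ∀ (buf : List Char),
    (pvTailRes false buf cs
        = PySem.Chars.strip (cs.splitOn ',').headI ++ pvTailJoin (cs.splitOn ',').tail) ∧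
    (buf.all PySem.Chars.isspace = true →
      pvTailRes true buf cs
        = PySem.Chars.rstrip (buf ++ (cs.splitOn ',').headI)
            ++ pvTailJoin (cs.splitOn ',').tail) := by
  induction cs with
  | nil =>
    intro buf
    constructor
    · simp [pvTailRes, pvTailJoin, List.splitOn, List.splitOnP_nil,
        PySem.Chars.strip, PySem.Chars.lstrip, PySem.Chars.rstrip]
    · intro hb
      simp [pvTailRes, pvTailJoin, List.splitOn, List.splitOnP_nil, pvRstrip_all_space hb]
  | cons c cs ih =>
    intro buf
    obtain ⟨h, t, hht⟩ := List.exists_cons_of_ne_nil (List.splitOnP_ne_nil (· == ',') cs)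
    have hsplit : cs.splitOn ',' = h :: t := hht
    by_cases hs : PySem.Chars.isspace c = true
    · have hcomma : c ≠ ',' := by
        intro hceq; subst hceq; simp [PySem.Chars.isspace] at hs
      have hcons : (c :: cs).splitOn ',' = (c :: h) :: t := by
        simp [List.splitOn, List.splitOnP_cons, hcomma, hht]
      constructor
      · simp only [pvTailRes, hs, if_pos, hcons, List.headI, List.tail]
        rw [(ih (buf ++ [c])).1, hsplit, pvStrip_cons_space hs]
        rfl
      · intro hb
        have hb' : (buf ++ [c]).all PySem.Chars.isspace = true := by
          simp [List.all_append, hb, hs]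
        simp only [pvTailRes, hs, if_pos, hcons, List.headI, List.tail]
        rw [(ih (buf ++ [c])).2 hb', hsplit]
        simp [List.append_assoc]
    · by_cases hc : c = ','
      · subst hc
        have hcons : (',' :: cs).splitOn ',' = [] :: h :: t := by
          simp [List.splitOn, List.splitOnP_cons, hht]
        constructor
        · simp only [pvTailRes, hs, Bool.false_eq_true, if_false, hcons,
            List.headI, List.tail]
          rw [(ih []).1, hsplit]
          simp [pvTailJoin, PySem.Chars.strip, PySem.Chars.lstrip, PySem.Chars.rstrip]
        · intro hb
          simp only [pvTailRes, hs, Bool.false_eq_true, if_false, hcons,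
            List.headI, List.tail]
          rw [(ih []).1, hsplit]
          simp [pvTailJoin, pvRstrip_all_space hb]
      · have hs' : PySem.Chars.isspace c = false := by simpa using hs
        have hcons : (c :: cs).splitOn ',' = (c :: h) :: t := by
          simp [List.splitOn, List.splitOnP_cons, hc, hht]
        constructor
        · simp only [pvTailRes, hs, Bool.false_eq_true, if_false, hc, if_false, hcons,
            List.headI, List.tail]
          rw [(ih []).2 (by simp), hsplit, pvStrip_cons_nonspace hs']
          simp
        · intro hb
          simp only [pvTailRes, hs, Bool.false_eq_true, if_false, hc, if_false, hcons,
            List.headI, List.tail]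
          rw [(ih []).2 (by simp), hsplit, pvRstrip_append_cons hs']
          simp

-- ===== VERDICT (by name: the statement is the Claim_ definition above) =====
theorem removeWhitespaceBtnComma_spec : Claim_equal_removeWhitespaceBtnComma := by
  intro s _
  unfold Spec_removeWhitespaceBtnComma removeWhitespaceBtnComma removeWhitespaceBtnComma_alt
  obtain ⟨h, t, hht⟩ := List.exists_cons_of_ne_nil (List.splitOnP_ne_nil (· == ',') s.toList)
  have hsplit : s.toList.splitOn ',' = h :: t := hht
  rw [pvAltGo_eq, pvSplitOn_eq, hsplit]
  rw [show (decide (([] : List Char) ≠ [] ∧ ([] : List Char).getLast? ≠ some ',')) = false by decide]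
  rw [(pvTailRes_spec s.toList []).1, hsplit]
  simp only [List.headI, List.tail]
  congr 1
  simp only [List.append_assoc]
  rw [PySem.List.foldl_append_eq_flatMap (fun tok => [','] ++ PySem.Chars.strip tok) t
    (PySem.Chars.strip h)]
  simp [pvTailJoin]
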